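-- pv_equiv track=rewrite | github.com/mercurystraw/ChatBot | src/app.py | format_messages_for_chatbot
-- ===== SOURCE A (Python) =====
-- def format_messages_for_chatbot(messages):
--     """将消息格式转换为Gradio Chatbot组件所需的格式"""
--     chatbot_messages = []
--     for i in range(0, len(messages), 2):
--         if i + 1 < len(messages):
--             user_msg = messages[i]['content']
--             assistant_msg = messages[i + 1]['content']
--             chatbot_messages.append([user_msg, assistant_msg])
--     return chatbot_messages
-- ===== SOURCE B (Python) =====
-- def format_messages_for_chatbot(messages):
--     """将消息格式转换为Gradio Chatbot组件所需的格式"""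
--     chatbot_messages = []
--     pending = None
--     for msg in messages:
--         if pending is None:
--             pending = msg
--         else:
--             chatbot_messages.append([pending['content'], msg['content']])
--             pending = None
--     return chatbot_messages
-- ===== Notes on version B (the rewrite author's own statement) =====
-- stated objective: alternative
-- what changed: Replaces the index loop stepping by 2 with its i+1 bounds guard by a single-pass state machine over the elements: an Option-typed 'pending' accumulator alternates between holding the user message and closing the pair, and a trailing unpaired message is simply left pending and discarded.
import Mathlib
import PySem

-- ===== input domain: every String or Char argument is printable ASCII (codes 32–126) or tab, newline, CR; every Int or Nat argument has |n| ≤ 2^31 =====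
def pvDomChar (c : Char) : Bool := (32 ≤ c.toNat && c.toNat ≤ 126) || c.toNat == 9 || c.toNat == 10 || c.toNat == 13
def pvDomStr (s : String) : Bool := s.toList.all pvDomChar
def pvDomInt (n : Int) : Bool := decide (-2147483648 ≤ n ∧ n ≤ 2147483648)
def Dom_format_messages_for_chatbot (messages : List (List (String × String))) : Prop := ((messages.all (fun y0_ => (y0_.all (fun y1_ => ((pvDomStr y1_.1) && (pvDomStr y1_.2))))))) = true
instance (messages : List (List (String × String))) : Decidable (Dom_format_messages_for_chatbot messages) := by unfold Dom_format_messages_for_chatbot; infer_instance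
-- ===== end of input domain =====

-- B replaces the index loop stepping by 2 with its i+1 bounds guard by a single-pass
-- state machine: an Option-typed 'pending' slot alternates between holding the user
-- message and closing the pair; a trailing unpaired message stays pending and is dropped.

-- ===== PORT A =====
def format_messages_for_chatbot (messages : List (List (String × String))) : List (List String) :=
  (PySem.List.pyRange 0 (messages.length : Int) 2).foldl
    (fun chatbot_messages i =>
      if i + 1 < (messages.length : Int) then
        let user_msg := PySem.Dict.getD (PySem.Dict.mk (PySem.List.pyGetD messages i [])) "content" ""
        let assistant_msg := PySem.Dict.getD (PySem.Dict.mk (PySem.List.pyGetD messages (i + 1) [])) "content" ""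
        chatbot_messages ++ [[user_msg, assistant_msg]]
      else chatbot_messages)
    []

-- ===== PORT B =====
def format_messages_for_chatbot_alt (messages : List (List (String × String))) : List (List String) :=
  (messages.foldl
    (fun st msg =>
      match st.2 with
      | none => (st.1, some msg)
      | some pending =>
          (st.1 ++ [[PySem.Dict.getD (PySem.Dict.mk pending) "content" "",
                     PySem.Dict.getD (PySem.Dict.mk msg) "content" ""]], none))
    (([] : List (List String)), (none : Option (List (String × String))))).1

-- ===== PRECONDITION & SPEC =====
-- Pre_ excludes exactly the inputs on which Python A raises KeyError: a message in a
-- consumed (paired) position lacking the "content" key.  (B raises there too.)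
def Pre_format_messages_for_chatbot (messages : List (List (String × String))) : Prop :=
  ∀ m ∈ messages.take (2 * (messages.length / 2)),
    (PySem.Dict.get? (PySem.Dict.mk m) "content").isSome = true
instance (messages : List (List (String × String))) : Decidable (Pre_format_messages_for_chatbot messages) := by unfold Pre_format_messages_for_chatbot; infer_instance

def pvWitness_format_messages_for_chatbot : (List (List (String × String))) :=
  [[("content", "hi"), ("role", "user")], [("content", "hello!")], [("content", "unpaired")]]

def Spec_format_messages_for_chatbot (messages : List (List (String × String))) (out : List (List String)) : Prop := out = format_messages_for_chatbot_alt messages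
instance (messages : List (List (String × String))) (out : List (List String)) : Decidable (Spec_format_messages_for_chatbot messages out) := by unfold Spec_format_messages_for_chatbot; infer_instance

-- ===== CLAIM (what is proved, stated in full; the proofs are below) =====
def Claim_equal_format_messages_for_chatbot : Prop := ∀ (messages : List (List (String × String))), Dom_format_messages_for_chatbot messages → Pre_format_messages_for_chatbot messages → Spec_format_messages_for_chatbot messages (format_messages_for_chatbot messages)

-- ===== LEMMAS AND PROOFS =====

-- proof-only characterisation both loops are reduced to
def pvPairs : List (List (String × String)) → List (List String)
  | x :: y :: rest =>
      [PySem.Dict.getD (PySem.Dict.mk x) "content" "",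
       PySem.Dict.getD (PySem.Dict.mk y) "content" ""] :: pvPairs rest
  | _ => []

lemma pyRange_two_eq_nil (a b : Int) (h : b ≤ a) : PySem.List.pyRange a b 2 = [] := by
  rw [PySem.List.pyRange_of_pos a b (by norm_num)]
  rw [if_neg (by omega)]
  simp

lemma pyRange_two_cons (a b : Int) (h : a < b) :
    PySem.List.pyRange a b 2 = a :: PySem.List.pyRange (a + 2) b 2 := by
  rw [PySem.List.pyRange_of_pos a b (by norm_num),
      PySem.List.pyRange_of_pos (a + 2) b (by norm_num)]
  have hc : (if a < b then ((b - a + 2 - 1) / 2).toNat else 0)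
      = (if a + 2 < b then ((b - (a + 2) + 2 - 1) / 2).toNat else 0) + 1 := by
    rw [if_pos h]
    by_cases h2 : a + 2 < b
    · rw [if_pos h2]; omega
    · rw [if_neg h2]; omega
  rw [hc, List.range_succ_eq_map, List.map_cons, List.map_map]
  congr 1
  · norm_num
  · apply List.map_congr_left
    intro k _
    simp only [Function.comp, Nat.succ_eq_add_one]
    push_cast
    ring

lemma loopA (messages : List (List (String × String))) (a : Nat) (acc : List (List String)) :
    (PySem.List.pyRange (a : Int) (messages.length : Int) 2).foldl
      (fun chatbot_messages i =>
        if i + 1 < (messages.length : Int) then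
          chatbot_messages ++
            [[PySem.Dict.getD (PySem.Dict.mk (PySem.List.pyGetD messages i [])) "content" "",
              PySem.Dict.getD (PySem.Dict.mk (PySem.List.pyGetD messages (i + 1) [])) "content" ""]]
        else chatbot_messages)
      acc
    = acc ++ pvPairs (messages.drop a) := by
  by_cases hlt : a < messages.length
  · rw [pyRange_two_cons _ _ (by exact_mod_cast hlt)]
    by_cases h2 : a + 1 < messages.length
    · have hdrop : messages.drop a = messages[a] :: messages[a+1] :: messages.drop (a + 2) := by
        rw [List.drop_eq_getElem_cons hlt, List.drop_eq_getElem_cons h2]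
      have hg1 : PySem.List.pyGetD messages (a : Int) [] = messages[a] := by
        rw [PySem.List.pyGetD_natCast]
        simp [List.getD, hlt]
      have hg2 : PySem.List.pyGetD messages ((a : Int) + 1) [] = messages[a+1] := by
        have : (a : Int) + 1 = ((a + 1 : Nat) : Int) := by push_cast; ring
        rw [this, PySem.List.pyGetD_natCast]
        simp [List.getD, h2]
      simp only [List.foldl_cons]
      rw [if_pos (by exact_mod_cast h2), hg1, hg2]
      have : (a : Int) + 2 = ((a + 2 : Nat) : Int) := by push_cast; ring
      rw [this, loopA messages (a + 2)]
      rw [hdrop]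
      simp [pvPairs]
    · have hdrop : messages.drop a = [messages[a]] := by
        rw [List.drop_eq_getElem_cons hlt]
        simp [List.drop_eq_nil_of_le (by omega : messages.length ≤ a + 1)]
      simp only [List.foldl_cons]
      rw [if_neg (by exact_mod_cast h2)]
      rw [pyRange_two_eq_nil _ _ (by omega : (messages.length : Int) ≤ (a : Int) + 2)]
      rw [hdrop]
      simp [pvPairs]
  · rw [pyRange_two_eq_nil _ _ (by exact_mod_cast Nat.le_of_not_lt hlt)]
    rw [List.drop_eq_nil_of_le (Nat.le_of_not_lt hlt)]
    simp [pvPairs]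
termination_by messages.length - a

lemma loopB (l : List (List (String × String))) (acc : List (List String)) :
    (l.foldl
      (fun st msg =>
        match st.2 with
        | none => (st.1, some msg)
        | some pending =>
            (st.1 ++ [[PySem.Dict.getD (PySem.Dict.mk pending) "content" "",
                       PySem.Dict.getD (PySem.Dict.mk msg) "content" ""]], none))
      (acc, (none : Option (List (String × String))))).1
    = acc ++ pvPairs l := by
  match l with
  | [] => simp [pvPairs]
  | [x] => simp [pvPairs]
  | x :: y :: rest =>
      simp only [List.foldl_cons]
      rw [loopB rest]
      simp [pvPairs]

-- ===== VERDICT (by name: the statement is the Claim_ definition above) =====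
theorem format_messages_for_chatbot_spec : Claim_equal_format_messages_for_chatbot := by
  intro messages _ _
  unfold Spec_format_messages_for_chatbot format_messages_for_chatbot format_messages_for_chatbot_alt
  have hA := loopA messages 0 []
  have hB := loopB messages []
  simp only [List.drop_zero, List.nil_append] at hA hB
  simpa [hB] using hA
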